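-- pv_equiv track=rewrite | github.com/janhavi8984909/OIB-SIP | Level2_Project5_Autocomplete_and_Autocorrect_Data_Analytics/src/nlp_analytics_autocorrect.py | _generate_deletes
-- ===== SOURCE A (Python) =====
-- from typing import List, Dict, Any, Set
--
-- def _generate_deletes(word: str, max_distance: int) -> Set[str]:
--     """Generate delete edits for a word"""
--     deletes = set()
--
--     for distance in range(1, max_distance + 1):
--         if distance == 1:
--             # Single deletes
--             for i in range(len(word)):
--                 deletes.add(word[:i] + word[i+1:])
--         else:
--             # Recursive deletes for higher distances
--             current_deletes = set(deletes)
--             for delete in current_deletes: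
--                 for i in range(len(delete)):
--                     new_delete = delete[:i] + delete[i+1:]
--                     deletes.add(new_delete)
--
--     return deletes
-- ===== SOURCE B (Python) =====
-- def _generate_deletes(word: str, max_distance: int):
--     """Level-targeted expansion: at distance d only the previous level's
--     strings (length len(word)-d+1) are expanded; earlier levels are never
--     re-expanded, and the loop stops once a level is empty."""
--     deletes = set()
--     for dist in range(1, max_distance + 1):
--         if dist == 1:
--             parents = [word]
--         else:
--             parents = [s for s in set(deletes) if len(s) == len(word) - dist + 1]
--         if not parents:
--             break
--         for s in parents:
--             for i in range(len(s)):
--                 deletes.add(s[:i] + s[i+1:])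
--     return deletes
-- ===== Notes on version B (the rewrite author's own statement) =====
-- stated objective: alternative
-- what changed: B expands only the previous level's strings (selected by their target length) at each distance step and stops when a level is empty, instead of A's re-expanding the whole accumulated delete set at every distance; intended as a constant-factor saving, not confirmed (total cost is dominated by the output size).
import Mathlib
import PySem

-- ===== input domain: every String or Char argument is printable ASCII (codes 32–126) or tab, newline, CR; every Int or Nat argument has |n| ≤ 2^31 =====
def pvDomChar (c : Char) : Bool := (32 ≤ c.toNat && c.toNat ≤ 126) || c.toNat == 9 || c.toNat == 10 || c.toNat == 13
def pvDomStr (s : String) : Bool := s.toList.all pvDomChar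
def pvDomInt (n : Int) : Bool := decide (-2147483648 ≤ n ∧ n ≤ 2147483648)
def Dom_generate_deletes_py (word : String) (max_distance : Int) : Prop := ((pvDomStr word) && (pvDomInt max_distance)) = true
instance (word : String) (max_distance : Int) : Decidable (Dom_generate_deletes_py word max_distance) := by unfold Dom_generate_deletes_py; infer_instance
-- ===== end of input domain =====

-- B expands, at each distance step, only the previous level's strings (those of
-- the current target length) instead of A's re-expansion of the whole
-- accumulated delete set, and stops as soon as a level is empty.

-- ===== PORT A =====
-- shared primitive: the Python expression s[:i] + s[i+1:] on code points
def pvDelete (cs : List Char) (i : Int) : List Char :=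
  PySem.List.slice cs none (some i) ++ PySem.List.slice cs (some (i + 1)) none

-- the inner loop 'for i in range(len(s)): deletes.add(s[:i] + s[i+1:])'
-- (identical code in both of A's branches and in B's expansion loop)
def pvExpand (d : PySem.Set String) (s : String) : PySem.Set String :=
  (PySem.List.pyRange 0 (PySem.Str.len s) 1).foldl
    (fun d i => PySem.Set.add d (String.ofList (pvDelete s.toList i))) d

def generate_deletes_py (word : String) (max_distance : Int) : List String :=
  (PySem.List.pyRange 1 (max_distance + 1) 1).foldl
    (fun deletes distance =>
      if distance = 1 then
        pvExpand deletes word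
      else
        let current_deletes := deletes
        current_deletes.foldl (fun d delete => pvExpand d delete) deletes)
    PySem.Set.empty

-- ===== PORT B =====
-- B's 'for dist in range(1, max_distance+1): … if not parents: break …' loop:
-- structural recursion on the number of remaining iterations
def pvLoopB (word : String) : PySem.Set String → Int → Nat → PySem.Set String
  | deletes, _, 0 => deletes
  | deletes, dist, k + 1 =>
    let parents :=
      if dist = 1 then [word]
      else (PySem.Set.ofList deletes).filter
        (fun s => PySem.Str.len s == PySem.Str.len word - dist + 1)
    if parents.isEmpty then deletes
    else pvLoopB word (parents.foldl (fun d s => pvExpand d s) deletes) (dist + 1) k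

def generate_deletes_py_alt (word : String) (max_distance : Int) : List String :=
  pvLoopB word PySem.Set.empty 1 max_distance.toNat

-- ===== PRECONDITION & SPEC =====
def Spec_generate_deletes_py (word : String) (max_distance : Int) (out : List String) : Prop := out = generate_deletes_py_alt word max_distance
instance (word : String) (max_distance : Int) (out : List String) : Decidable (Spec_generate_deletes_py word max_distance out) := by unfold Spec_generate_deletes_py; infer_instance

-- ===== CLAIM (what is proved, stated in full; the proofs are below) =====
def Claim_equal_generate_deletes_py : Prop := ∀ (word : String) (max_distance : Int), Dom_generate_deletes_py word max_distance → Spec_generate_deletes_py word max_distance (generate_deletes_py word max_distance)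

-- ===== LEMMAS AND PROOFS =====

-- the children of s, in index order
def pvChildL (s : String) : List String :=
  (PySem.List.pyRange 0 (PySem.Str.len s) 1).map (fun i => String.ofList (pvDelete s.toList i))

-- A's per-parent expansion, as a fold over the child list
def pvFA (d : PySem.Set String) (s : String) : PySem.Set String :=
  (pvChildL s).foldl PySem.Set.add d

theorem pvExpand_eq (d : PySem.Set String) (s : String) :
    pvExpand d s = pvFA d s := by
  simp [pvExpand, pvFA, pvChildL, List.foldl_map]

-- folding Set.add appends a suffix of fresh elements drawn from cs
theorem pvFoldAdd_suffix (cs : List String) : ∀ L : List String,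
    ∃ δ, cs.foldl PySem.Set.add L = L ++ δ ∧ ∀ c ∈ δ, c ∈ cs := by
  induction cs with
  | nil => intro L; exact ⟨[], by simp⟩
  | cons c cs ih =>
    intro L
    by_cases hc : c ∈ L
    · obtain ⟨δ, heq, hmem⟩ := ih L
      exact ⟨δ, by rw [List.foldl_cons, PySem.Set.add_of_mem hc]; exact heq,
        fun x hx => List.mem_cons_of_mem _ (hmem x hx)⟩
    · obtain ⟨δ, heq, hmem⟩ := ih (L ++ [c])
      refine ⟨c :: δ, ?_, ?_⟩
      · rw [List.foldl_cons, PySem.Set.add_of_not_mem hc, heq]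
        simp
      · intro x hx
        rcases List.mem_cons.mp hx with rfl | hx
        · exact List.mem_cons_self ..
        · exact List.mem_cons_of_mem _ (hmem x hx)

theorem pvFoldAdd_mono (cs : List String) (L : List String) :
    L ⊆ cs.foldl PySem.Set.add L := by
  obtain ⟨δ, heq, -⟩ := pvFoldAdd_suffix cs L
  rw [heq]
  exact List.subset_append_left _ _

theorem pvFoldAdd_closed (cs : List String) : ∀ L : List String,
    ∀ c ∈ cs, c ∈ cs.foldl PySem.Set.add L := by
  induction cs with
  | nil => intro L c h; simp at h
  | cons a cs ih =>
    intro L c hc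
    rw [List.foldl_cons]
    rcases List.mem_cons.mp hc with rfl | h
    · exact pvFoldAdd_mono cs _ (by simp [PySem.Set.add_eq_ite]; split <;> simp_all)
    · exact ih _ c h

theorem pvFoldAdd_nodup (cs : List String) : ∀ L : List String,
    L.Nodup → (cs.foldl PySem.Set.add L).Nodup := by
  induction cs with
  | nil => intro L h; exact h
  | cons c cs ih =>
    intro L h
    rw [List.foldl_cons]
    exact ih _ (PySem.Set.nodup_add _ _ h)

-- the same three facts for a whole list of parents
theorem pvFAs_suffix (F : List String) : ∀ L : List String,
    ∃ δ, F.foldl pvFA L = L ++ δ ∧ ∀ c ∈ δ, ∃ x ∈ F, c ∈ pvChildL x := by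
  induction F with
  | nil => intro L; exact ⟨[], by simp⟩
  | cons s F ih =>
    intro L
    obtain ⟨δ₁, heq₁, hmem₁⟩ := pvFoldAdd_suffix (pvChildL s) L
    obtain ⟨δ₂, heq₂, hmem₂⟩ := ih (L ++ δ₁)
    refine ⟨δ₁ ++ δ₂, ?_, ?_⟩
    · rw [List.foldl_cons, show pvFA L s = L ++ δ₁ from heq₁, heq₂, List.append_assoc]
    · intro c hc
      rcases List.mem_append.mp hc with hc | hc
      · exact ⟨s, List.mem_cons_self .., hmem₁ c hc⟩
      · obtain ⟨x, hx, hcx⟩ := hmem₂ c hc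
        exact ⟨x, List.mem_cons_of_mem _ hx, hcx⟩

theorem pvFAs_closed (F : List String) : ∀ L : List String,
    ∀ x ∈ F, ∀ c ∈ pvChildL x, c ∈ F.foldl pvFA L := by
  induction F with
  | nil => intro L x h; simp at h
  | cons a F ih =>
    intro L x hx c hc
    rw [List.foldl_cons]
    rcases List.mem_cons.mp hx with rfl | hx
    · obtain ⟨δ, heq, -⟩ := pvFAs_suffix F (pvFA L x)
      rw [heq]
      exact List.mem_append.mpr (Or.inl (pvFoldAdd_closed (pvChildL x) L c hc))
    · exact ih _ x hx c hc

theorem pvFAs_nodup (F : List String) : ∀ L : List String,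
    L.Nodup → (F.foldl pvFA L).Nodup := by
  induction F with
  | nil => intro L h; exact h
  | cons s F ih =>
    intro L h
    rw [List.foldl_cons]
    exact ih _ (pvFoldAdd_nodup (pvChildL s) L h)

theorem pvAdd_noop (cs : List String) : ∀ L : List String,
    (∀ c ∈ cs, c ∈ L) → cs.foldl PySem.Set.add L = L := by
  induction cs with
  | nil => intro L _; rfl
  | cons c cs ih =>
    intro L h
    rw [List.foldl_cons, PySem.Set.add_of_mem (h c (List.mem_cons_self ..))]
    exact ih L (fun x hx => h x (List.mem_cons_of_mem _ hx))

-- expanding parents whose children are all already present is a no-op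
theorem pvPrefix_noop (P : List String) : ∀ L : List String,
    (∀ x ∈ P, ∀ c ∈ pvChildL x, c ∈ L) → P.foldl pvFA L = L := by
  induction P with
  | nil => intro L _; rfl
  | cons x P ih =>
    intro L h
    rw [List.foldl_cons,
      show pvFA L x = L from pvAdd_noop (pvChildL x) L (h x (List.mem_cons_self ..))]
    exact ih L (fun y hy => h y (List.mem_cons_of_mem _ hy))

-- deleting one character shortens the string by one
theorem pvChildL_len (s c : String) (hc : c ∈ pvChildL s) :
    PySem.Str.len c = PySem.Str.len s - 1 := by
  unfold pvChildL at hc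
  obtain ⟨i, hi, rfl⟩ := List.mem_map.mp hc
  obtain ⟨h0, h1⟩ := PySem.List.mem_pyRange_one.mp hi
  simp only [PySem.Str.len_eq] at h1 ⊢
  rw [String.toList_ofList]
  unfold pvDelete
  rw [PySem.List.slice_to s.toList h0, PySem.List.slice_from s.toList (by omega)]
  simp only [List.length_append, List.length_take, List.length_drop]
  omega

-- invariant tying A's state L to B's state: the frontier F (the strings of
-- length t) is the fresh suffix of L, every older element is longer than t
-- and already has all its children in L
def pvInv (L F : List String) (t : Int) : Prop :=
  ∃ P, L = P ++ F ∧ L.Nodup ∧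
    (∀ x ∈ P, ∀ c ∈ pvChildL x, c ∈ L) ∧
    (∀ x ∈ P, t < PySem.Str.len x) ∧
    (∀ x ∈ F, PySem.Str.len x = t)

theorem pvFilter_frontier (L F P : List String) (t : Int) (hLP : L = P ++ F)
    (hnd : L.Nodup) (hP : ∀ x ∈ P, t < PySem.Str.len x)
    (hF : ∀ x ∈ F, PySem.Str.len x = t) :
    (PySem.Set.ofList L).filter (fun s => PySem.Str.len s == t) = F := by
  rw [PySem.Set.ofList_eq_self_of_nodup L hnd, hLP, List.filter_append,
    List.filter_eq_nil_iff.mpr (fun x hx => by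
      have := hP x hx
      simp only [PySem.Str.len_eq] at this
      simp only [beq_iff_eq, PySem.Str.len_eq]
      omega),
    List.filter_eq_self.mpr (fun x hx => by
      simp only [beq_iff_eq]
      exact hF x hx)]
  simp

theorem pvMain (word : String) (k : Nat) : ∀ (L F : List String) (dist : Int),
    2 ≤ dist → pvInv L F (PySem.Str.len word - dist + 1) →
    pvLoopB word L dist k = (fun L : List String => L.foldl pvFA L)^[k] L := by
  induction k with
  | zero => intro L F dist _ _; rfl
  | succ k ih =>
    intro L F dist hd hInv
    obtain ⟨P, hLP, hnd, hcl, hP, hF⟩ := hInv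
    have hne1 : ¬ dist = 1 := by omega
    rw [pvLoopB]
    simp only [if_neg hne1,
      pvFilter_frontier L F P (PySem.Str.len word - dist + 1) hLP hnd hP hF]
    by_cases hFnil : F = []
    · subst hFnil
      rw [List.append_nil] at hLP
      subst hLP
      simp only [List.isEmpty_nil, if_true]
      have hfix : L.foldl pvFA L = L := pvPrefix_noop L L hcl
      exact (Function.iterate_fixed
        (f := fun L : List String => L.foldl pvFA L) hfix (k + 1)).symm
    · obtain ⟨a, F', rfl⟩ := List.exists_cons_of_ne_nil hFnil
      simp only [List.isEmpty_cons, Bool.false_eq_true, if_false]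
      rw [Function.iterate_succ_apply]
      obtain ⟨δ, heq, hprov⟩ := pvFAs_suffix (a :: F') L
      have hstepA : L.foldl pvFA L = (a :: F').foldl pvFA L := by
        calc L.foldl pvFA L = (P ++ a :: F').foldl pvFA L := by rw [← hLP]
          _ = (a :: F').foldl pvFA (P.foldl pvFA L) := List.foldl_append ..
          _ = (a :: F').foldl pvFA L := by rw [pvPrefix_noop P L hcl]
      show pvLoopB word ((a :: F').foldl (fun d s => pvExpand d s) L) (dist + 1) k
          = (fun L : List String => L.foldl pvFA L)^[k] (L.foldl pvFA L)
      rw [show (a :: F').foldl (fun d s => pvExpand d s) L = (a :: F').foldl pvFA L by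
            simp only [pvExpand_eq],
          hstepA]
      have hmono : L ⊆ (a :: F').foldl pvFA L := by
        rw [heq]; exact List.subset_append_left _ _
      refine ih _ δ (dist + 1) (by omega) ⟨L, heq, pvFAs_nodup _ L hnd, ?_, ?_, ?_⟩
      · intro x hx c hc
        rw [hLP] at hx
        rcases List.mem_append.mp hx with hx | hx
        · exact hmono (hcl x hx c hc)
        · exact pvFAs_closed _ L x hx c hc
      · intro x hx
        rw [hLP] at hx
        rcases List.mem_append.mp hx with hx | hx
        · have := hP x hx; omega
        · have := hF x hx; omega
      · intro c hc
        obtain ⟨x, hxF, hcx⟩ := hprov c hc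
        have h1 := pvChildL_len x c hcx
        have h2 := hF x hxF
        omega

theorem pvFoldA {α : Type} (fT fE : α → α) (l : List Int) :
    ∀ init : α, (∀ x ∈ l, x ≠ 1) →
      l.foldl (fun a x => if x = 1 then fT a else fE a) init = fE^[l.length] init := by
  induction l with
  | nil => intro init _; rfl
  | cons b l ih =>
    intro init hl
    rw [List.foldl_cons, List.length_cons, Function.iterate_succ_apply,
      if_neg (hl b (List.mem_cons_self ..))]
    exact ih (fE init) (fun x hx => hl x (List.mem_cons_of_mem _ hx))

theorem pv_equal (word : String) (m : Int) :
    generate_deletes_py word m = generate_deletes_py_alt word m := by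
  by_cases hm : m ≤ 0
  · rw [generate_deletes_py, generate_deletes_py_alt,
      PySem.List.pyRange_one_eq_nil (show m + 1 ≤ (1 : Int) by omega),
      show m.toNat = 0 from by omega]
    rfl
  · have hA1 : PySem.List.pyRange 1 (m + 1) 1 = 1 :: PySem.List.pyRange 2 (m + 1) 1 := by
      rw [PySem.List.pyRange_one_cons (by omega)]; norm_num
    have hk : m.toNat = (m - 1).toNat + 1 := by omega
    -- the single deletes of word, and the facts about them
    have hsub : ∀ c ∈ pvExpand PySem.Set.empty word, c ∈ pvChildL word := by
      obtain ⟨δ, heq, hmem⟩ := pvFoldAdd_suffix (pvChildL word) PySem.Set.empty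
      intro c hc
      rw [pvExpand_eq] at hc
      rw [show pvFA PySem.Set.empty word = δ from by
            rw [pvFA]; rw [heq]; simp [PySem.Set.empty]] at hc
      exact hmem c hc
    have hInv : pvInv (pvExpand PySem.Set.empty word) (pvExpand PySem.Set.empty word)
        (PySem.Str.len word - 2 + 1) := by
      refine ⟨[], by simp, ?_, by simp, by simp, ?_⟩
      · rw [pvExpand_eq]
        exact pvFoldAdd_nodup (pvChildL word) PySem.Set.empty List.nodup_nil
      · intro x hx
        have := pvChildL_len word x (hsub x hx)
        omega
    have hAfold :
        (PySem.List.pyRange 2 (m + 1) 1).foldl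
          (fun (a : PySem.Set String) (x : Int) =>
            if x = 1 then pvExpand a word
            else a.foldl (fun d delete => pvExpand d delete) a)
          (pvExpand PySem.Set.empty word)
        = (fun L : List String => L.foldl pvFA L)^[(m - 1).toNat]
            (pvExpand PySem.Set.empty word) := by
      have hne : ∀ x ∈ PySem.List.pyRange 2 (m + 1) 1, x ≠ 1 := by
        intro x hx
        have := (PySem.List.mem_pyRange_one).mp hx
        omega
      have hlen : (PySem.List.pyRange 2 (m + 1) 1).length = (m - 1).toNat := by
        rw [PySem.List.length_pyRange_one]; omega
      have h := pvFoldA (fun a : PySem.Set String => pvExpand a word)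
        (fun a : PySem.Set String => a.foldl (fun d delete => pvExpand d delete) a)
        (PySem.List.pyRange 2 (m + 1) 1) (pvExpand PySem.Set.empty word) hne
      rw [hlen] at h
      refine h.trans ?_
      rw [show (fun a : PySem.Set String => a.foldl (fun d delete => pvExpand d delete) a)
          = (fun L : List String => L.foldl pvFA L) from by funext d; simp [pvExpand_eq]]
    rw [generate_deletes_py, generate_deletes_py_alt, hA1, hk]
    simp only [List.foldl_cons]
    rw [pvLoopB]
    simp only [reduceIte, List.isEmpty_cons, Bool.false_eq_true, if_false,
      List.foldl_cons, List.foldl_nil]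
    rw [show (1 : Int) + 1 = 2 from by norm_num,
      pvMain word (m - 1).toNat (pvExpand PySem.Set.empty word)
        (pvExpand PySem.Set.empty word) 2 (by norm_num) hInv]
    exact hAfold

-- ===== VERDICT (by name: the statement is the Claim_ definition above) =====
theorem generate_deletes_py_spec : Claim_equal_generate_deletes_py := by
  intro word m _
  exact pv_equal word m
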